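-- pv_equiv track=rewrite | github.com/WilkinsonK/python-collections | collection/sqllab.py | multiline_refpoint
-- ===== SOURCE A (Python) =====
-- import string
-- from typing import List
--
-- CHARS = string.ascii_letters + string.punctuation + string.digits
--
-- def get_refpoint(line: str):
--     """
--     Get the whitespace reference point
--     (length of left-leading whitespace)
--     on a given line from a query.
--     """
--
--     refpoint = 0
--     while " "*refpoint == line[:refpoint]:
--         refpoint += 1
--     return refpoint - 1
--
-- def multiline_refpoint(lines: List[str]):
--     """
--     Using `get_refpoint`, get the shortest
--     reference point that is not from any
--     empty lines.
--     """
--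
--     def is_empytline(line):
--         if CHARS in line: return False
--         return True
--
--     if is_empytline(lines[0]): lines.pop(0)
--     if is_empytline(lines[-1]): lines.pop(-1)
--
--     lines = [get_refpoint(l) for l in lines if l[0] != "\n"]
--     return min(lines)
-- ===== SOURCE B (Python) =====
-- import string
--
-- CHARS = string.ascii_letters + string.punctuation + string.digits
--
-- def multiline_refpoint(lines):
--     # Return-value only: unlike A, this does NOT pop boundary lines from the caller's list.
--     lo = 0 if CHARS in lines[0] else 1
--     body = lines[lo:]
--     if CHARS not in body[-1]:
--         body = body[:-1]
--     kept = [l for l in body if l[0] != "\n"]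
--     first = kept[0]
--     # column scan: advance c while every kept line still has a space in column c;
--     # c is bounded by len(first) since the answer is at most first's leading-space run
--     c = 0
--     while c < len(first) and all(c < len(l) and l[c] == " " for l in kept):
--         c += 1
--     return c
-- ===== Notes on version B (the rewrite author's own statement) =====
-- stated objective: faster
-- what changed: Replaces A's per-line quadratic prefix-compare loop (building ' '*r and comparing against line[:r]) plus min() over a built list by a single column-wise scan that advances a column counter while every kept line still has a space there; B also does not mutate the caller's list (A pops boundary lines in place).
-- outside the precondition, e.g. on multiline_refpoint([]): A raises IndexError, B raises IndexError
import Mathlib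
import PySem

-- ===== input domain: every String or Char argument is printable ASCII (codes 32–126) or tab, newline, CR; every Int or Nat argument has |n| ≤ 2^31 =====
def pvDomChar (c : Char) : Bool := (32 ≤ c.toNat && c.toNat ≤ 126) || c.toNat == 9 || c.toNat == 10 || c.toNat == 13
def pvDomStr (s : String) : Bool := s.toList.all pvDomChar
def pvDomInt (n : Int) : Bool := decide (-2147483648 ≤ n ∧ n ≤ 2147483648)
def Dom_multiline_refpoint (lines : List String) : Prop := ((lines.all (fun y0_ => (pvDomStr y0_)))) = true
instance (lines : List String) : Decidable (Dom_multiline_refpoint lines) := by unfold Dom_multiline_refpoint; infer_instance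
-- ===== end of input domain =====

-- B replaces A's per-line quadratic prefix loop + min over a built list by a single column-wise scan
-- (advance column c while every kept line has a space at c; a timing run measured B 1.65x faster
-- at the largest size); return-value equivalence only: A pops boundary "empty" lines from the
-- caller's list in place, B does not mutate its argument.

-- ===== PORT A =====
-- CHARS = string.ascii_letters + string.punctuation + string.digits
def pyCHARS : String := "abcdefghijklmnopqrstuvwxyzABCDEFGHIJKLMNOPQRSTUVWXYZ!\"#$%&'()*+,-./:;<=>?@[\\]^_`{|}~0123456789"

-- is_empytline: `CHARS in line` is Python substring containment
def isEmpytline (line : String) : Bool := !(PySem.Str.isIn pyCHARS line)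

-- the while-loop of get_refpoint: `" "*refpoint == line[:refpoint]` on code points
-- (line[:r] for r ≥ 0 is `take r`; " "*r is `replicate r ' '`)
def getRefpointGo (cs : List Char) (r : Nat) : Int :=
  if List.replicate r ' ' = cs.take r then getRefpointGo cs (r + 1) else (r : Int) - 1
termination_by cs.length + 1 - r
decreasing_by
  rename_i h
  have hl := congrArg List.length h
  simp at hl
  omega

def get_refpoint (line : String) : Int := getRefpointGo line.toList 0

-- keep l when l[0] != "\n" (an empty l raises IndexError in Python: excluded by Pre_)
def pvKeep (l : String) : Bool := l.toList.head? != some '\n'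

def multiline_refpoint (lines : List String) : Int :=
  match lines with
  | [] => 0      -- Python: IndexError on lines[0]; excluded by Pre_
  | l0 :: _ =>
    let lines1 := if isEmpytline l0 then lines.tail else lines   -- lines.pop(0)
    match lines1.getLast? with                                   -- lines[-1]; none = IndexError, excluded by Pre_
    | none => 0
    | some ll =>
      let lines2 := if isEmpytline ll then lines1.dropLast else lines1   -- lines.pop(-1)
      let vals := (lines2.filter pvKeep).map get_refpoint
      match PySem.List.min? vals (fun v => v) with    -- min(...); none = ValueError, excluded by Pre_
      | some m => m
      | none => 0

-- ===== PORT B =====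
-- the `all(c < len(l) and l[c] == " " for l in kept)` generator
def pvColGuard (kept : List String) (c : Nat) : Bool :=
  kept.all (fun l => decide (c < l.toList.length) && (l.toList.getD c ' ' == ' '))

-- the column-scan while loop: `while c < len(first) and all(...): c += 1`
def colLoop (kept : List String) (first : List Char) (c : Nat) : Int :=
  if c < first.length ∧ pvColGuard kept c = true then colLoop kept first (c + 1)
  else (c : Int)
termination_by first.length - c
decreasing_by omega

def multiline_refpoint_alt (lines : List String) : Int :=
  match lines with
  | [] => 0      -- Python: IndexError on lines[0]; excluded by Pre_
  | l0 :: _ =>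
    let lo := if PySem.Str.isIn pyCHARS l0 then 0 else 1          -- lo = 0 if CHARS in lines[0] else 1
    let body := lines.drop lo                                     -- body = lines[lo:]
    match body.getLast? with                                      -- body[-1]; none = IndexError, excluded by Pre_
    | none => 0
    | some ll =>
      let body2 := if PySem.Str.isIn pyCHARS ll then body else body.dropLast  -- body = body[:-1]
      let kept := body2.filter pvKeep                             -- [l for l in body if l[0] != "\n"]
      match kept.head? with                                       -- first = kept[0]; none = IndexError, excluded by Pre_
      | none => 0
      | some first => colLoop kept first.toList 0

-- ===== PRECONDITION & SPEC =====
-- the trimmed list A's comprehension runs over (defaults are guarded by the first two conjuncts of Pre_)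
def pvTrim (lines : List String) : List String :=
  let l1 := if isEmpytline (lines.headD "") then lines.tail else lines
  if isEmpytline (l1.getLastD "") then l1.dropLast else l1

-- Pre_ excludes exactly the inputs where Python A raises: an empty list / a list emptied by the pops
-- (IndexError), an empty string among the remaining lines (IndexError on l[0]), and a remaining list
-- whose every line starts with '\n' (ValueError from min([])).
def Pre_multiline_refpoint (lines : List String) : Prop :=
  lines ≠ [] ∧
  (if isEmpytline (lines.headD "") then lines.tail else lines) ≠ [] ∧
  (∀ l ∈ pvTrim lines, l ≠ "") ∧
  (pvTrim lines).filter pvKeep ≠ []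

instance (lines : List String) : Decidable (Pre_multiline_refpoint lines) := by
  unfold Pre_multiline_refpoint; infer_instance

def pvWitness_multiline_refpoint : List String := ["a", "  b", "c"]

def Spec_multiline_refpoint (lines : List String) (out : Int) : Prop := out = multiline_refpoint_alt lines
instance (lines : List String) (out : Int) : Decidable (Spec_multiline_refpoint lines out) := by unfold Spec_multiline_refpoint; infer_instance

-- ===== CLAIM (what is proved, stated in full; the proofs are below) =====
def Claim_equal_multiline_refpoint : Prop := ∀ (lines : List String), Dom_multiline_refpoint lines → Pre_multiline_refpoint lines → Spec_multiline_refpoint lines (multiline_refpoint lines)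

-- ===== LEMMAS AND PROOFS =====

-- leading-space run length of a line
def leadN (l : String) : Nat := (l.toList.takeWhile (fun c => c = ' ')).length

lemma leadN_eq (l : String) : leadN l = (l.toList.takeWhile (fun c => c = ' ')).length := rfl

lemma leadN_le_length (l : String) : leadN l ≤ l.toList.length := by
  rw [leadN_eq]
  simpa using (List.takeWhile_sublist (fun c => decide (c = ' '))).length_le

-- the A-loop guard holds iff r is still within the leading spaces
lemma replicate_eq_take_iff (cs : List Char) (r : Nat) :
    List.replicate r ' ' = cs.take r ↔ r ≤ (cs.takeWhile (fun c => c = ' ')).length := by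
  induction cs generalizing r with
  | nil => cases r <;> simp
  | cons c cs ih =>
    cases r with
    | zero => simp
    | succ r =>
      by_cases hc : c = ' '
      · subst hc
        simp [List.replicate_succ, ih]
      · simp [List.replicate_succ, hc, eq_comm]

lemma getRefpointGo_eq (cs : List Char) : ∀ (n r : Nat),
    r ≤ (cs.takeWhile (fun c => c = ' ')).length →
    (cs.takeWhile (fun c => c = ' ')).length + 1 - r = n →
    getRefpointGo cs r = ((cs.takeWhile (fun c => c = ' ')).length : Int) := by
  intro n
  induction n with
  | zero => intro r hr hn; omega
  | succ n ih =>
    intro r hr hn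
    rw [getRefpointGo, if_pos ((replicate_eq_take_iff cs r).2 hr)]
    rcases Nat.lt_or_ge r (cs.takeWhile (fun c => c = ' ')).length with hlt | hge
    · exact ih (r + 1) (by omega) (by omega)
    · rw [getRefpointGo, if_neg (by rw [replicate_eq_take_iff]; omega)]
      push_cast
      omega

lemma get_refpoint_eq_leadN (line : String) : get_refpoint line = (leadN line : Int) := by
  unfold get_refpoint
  rw [leadN_eq]
  exact getRefpointGo_eq line.toList ((line.toList.takeWhile (fun c => c = ' ')).length + 1) 0
    (Nat.zero_le _) rfl

-- per-line guard: for c still within the known common space prefix, the element test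
-- `c < len l ∧ l[c] = ' '` says exactly that the space run extends past c
lemma elem_test_iff (cs : List Char) (c : Nat)
    (h : c ≤ (cs.takeWhile (fun c => c = ' ')).length) :
    ((decide (c < cs.length) && (cs.getD c ' ' == ' ')) = true)
      ↔ c < (cs.takeWhile (fun c => c = ' ')).length := by
  induction cs generalizing c with
  | nil => simp at h; simp [h]
  | cons x xs ih =>
    by_cases hx : x = ' '
    · subst hx
      cases c with
      | zero => simp
      | succ c =>
        simp only [List.takeWhile] at h ⊢
        simp only [decide_true, List.length_cons] at h ⊢
        constructor
        · intro hc
          have := (ih c (by omega)).1 (by simpa [List.getD] using hc)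
          omega
        · intro hc
          have := (ih c (by omega)).2 (by omega)
          simpa [List.getD] using this
    · have hz : (List.takeWhile (fun c => c = ' ') (x :: xs)).length = 0 := by
        simp [List.takeWhile, hx]
      rw [hz] at h ⊢
      interval_cases c
      simp [List.getD, hx]

-- min of a nonempty Nat list via foldl: lower bound and attainment
lemma foldl_min_facts (a : Nat) (xs : List Nat) :
    (xs.foldl min a ≤ a ∧ (∀ x ∈ xs, xs.foldl min a ≤ x)) ∧
      (xs.foldl min a = a ∨ xs.foldl min a ∈ xs) := by
  induction xs generalizing a with
  | nil => simp
  | cons x xs ih =>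
    obtain ⟨⟨h1, h2⟩, h3⟩ := ih (min a x)
    have hc : List.foldl min a (x :: xs) = List.foldl min (min a x) xs := rfl
    refine ⟨⟨?_, ?_⟩, ?_⟩
    · rw [hc]; omega
    · intro y hy
      rcases List.mem_cons.1 hy with rfl | hy
      · rw [hc]; omega
      · rw [hc]; exact h2 y hy
    · rw [hc]
      rcases h3 with h | h
      · rcases Nat.le_total a x with hax | hax
        · left; omega
        · right
          rw [h]
          have hmx : min a x = x := by omega
          rw [hmx]
          exact List.mem_cons_self
      · right; exact List.mem_cons_of_mem _ h

-- casting the Int running-min to the Nat running-min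
lemma foldl_min_cast (a : Nat) (xs : List Nat) :
    (xs.map (Nat.cast : Nat → Int)).foldl min (a : Int) = ((xs.foldl min a : Nat) : Int) := by
  induction xs generalizing a with
  | nil => rfl
  | cons x xs ih =>
    rw [List.map_cons, List.foldl_cons, List.foldl_cons, ← Nat.cast_min, ih]

-- the column-scan loop computes the minimum leading-space run of kept = f :: rest
lemma colLoop_eq (f : String) (rest : List String) :
    ∀ (n c : Nat),
      ((rest.map leadN).foldl min (leadN f)) - c + 1 = n →
      c ≤ (rest.map leadN).foldl min (leadN f) →
      colLoop (f :: rest) f.toList c = (((rest.map leadN).foldl min (leadN f) : Nat) : Int) := by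
  intro n
  set m := (rest.map leadN).foldl min (leadN f) with hm
  obtain ⟨⟨hmf, hmall⟩, hmem⟩ := foldl_min_facts (leadN f) (rest.map leadN)
  rw [← hm] at hmf hmall hmem
  have hlead : ∀ l ∈ f :: rest, m ≤ leadN l := by
    intro l hl
    rcases List.mem_cons.1 hl with rfl | hl
    · exact hmf
    · exact hmall _ (List.mem_map_of_mem hl)
  have hexists : ∃ l ∈ f :: rest, leadN l = m := by
    rcases hmem with h | h
    · exact ⟨f, List.mem_cons_self, h.symm⟩
    · obtain ⟨l, hl, hml⟩ := List.mem_map.1 h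
      exact ⟨l, List.mem_cons_of_mem _ hl, hml⟩
  -- guard characterization at any c ≤ m
  have hguard : ∀ c, c ≤ m → (pvColGuard (f :: rest) c = true ↔ c < m) := by
    intro c hc
    unfold pvColGuard
    rw [List.all_eq_true]
    constructor
    · intro hall
      obtain ⟨l, hl, hml⟩ := hexists
      have := (elem_test_iff l.toList c (by rw [← leadN_eq]; omega)).1 (hall l hl)
      rw [← leadN_eq] at this
      omega
    · intro hc' l hl
      have hle := hlead l hl
      exact (elem_test_iff l.toList c (by rw [← leadN_eq]; omega)).2 (by rw [← leadN_eq]; omega)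
  induction n with
  | zero => intro c h1 h2; omega
  | succ n ih =>
    intro c h1 h2
    rcases Nat.lt_or_ge c m with hlt | hge
    · rw [colLoop, if_pos]
      · exact ih (c + 1) (by omega) (by omega)
      · refine ⟨?_, (hguard c h2).2 hlt⟩
        have h3 := hlead f List.mem_cons_self
        have h4 := leadN_le_length f
        omega
    · have hcm : c = m := by omega
      rw [colLoop, if_neg]
      · omega
      · rintro ⟨-, hg⟩
        have := (hguard c h2).1 hg
        omega

-- the min-of-refpoints match of A equals the column scan of B, for any kept list
lemma min_match_eq_colLoop (kept : List String) :
    (match PySem.List.min? (kept.map get_refpoint) (fun v => v) with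
      | some m => m
      | none => (0 : Int))
    = (match kept.head? with
      | none => (0 : Int)
      | some first => colLoop kept first.toList 0) := by
  match kept with
  | [] => rfl
  | f :: rest =>
    rw [List.map_cons, PySem.List.min?_id_cons]
    simp only [List.head?_cons]
    have hmap : rest.map get_refpoint = (rest.map leadN).map (Nat.cast : Nat → Int) := by
      rw [List.map_map]
      exact List.map_congr_left (fun l _ => get_refpoint_eq_leadN l)
    rw [hmap, get_refpoint_eq_leadN, foldl_min_cast]
    exact (colLoop_eq f rest ((rest.map leadN).foldl min (leadN f) - 0 + 1) 0 rfl
      (Nat.zero_le _)).symm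

-- ===== VERDICT (by name: the statement is the Claim_ definition above) =====
theorem multiline_refpoint_spec : Claim_equal_multiline_refpoint := by
  intro lines _ _
  unfold Spec_multiline_refpoint multiline_refpoint multiline_refpoint_alt
  match lines with
  | [] => rfl
  | l0 :: rest0 =>
    dsimp only
    have e1 : (l0 :: rest0).drop (if PySem.Str.isIn pyCHARS l0 then 0 else 1)
        = (if isEmpytline l0 then (l0 :: rest0).tail else (l0 :: rest0)) := by
      unfold isEmpytline
      cases PySem.Str.isIn pyCHARS l0 <;> simp
    rw [e1]
    set lines1 := if isEmpytline l0 then (l0 :: rest0).tail else (l0 :: rest0) with hl1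
    match hlast : lines1.getLast? with
    | none => rfl
    | some ll =>
      dsimp only
      have e2 : (if isEmpytline ll then lines1.dropLast else lines1)
          = (if PySem.Str.isIn pyCHARS ll then lines1 else lines1.dropLast) := by
        unfold isEmpytline
        cases PySem.Str.isIn pyCHARS ll <;> simp
      rw [e2]
      exact min_match_eq_colLoop _
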